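-- pv_equiv track=rewrite | github.com/JunYupK/Algorithm | naver3.py | solution
-- ===== SOURCE A (Python) =====
-- def solution(N, A, B):
--     # write your code in Python 3.6
--     node = {}
--     answer = 0
--     tmp = N
--     for i in range(len(A)):
--         if A[i] not in node:
--             node[A[i]] = 1
--         else:
--             node[A[i]] += 1
--         if B[i] not in node:
--             node[B[i]] = 1
--         else:
--             node[B[i]] += 1
--
--     node = dict(sorted(node.items(), key=lambda x:x[1], reverse=True))
--     for k, v in node.items():
--         node[k] = tmp
--         tmp -= 1
--     for i in range(len(A)):
--         answer += node[A[i]] + node[B[i]]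
--     return answer
-- ===== SOURCE B (Python) =====
-- def solution(N, A, B):
--     # Bucket nodes by degree (counting sort) instead of comparison-sorting; O(V + E).
--     deg = {}
--     for a, b in zip(A, B):
--         deg[a] = deg.get(a, 0) + 1
--         deg[b] = deg.get(b, 0) + 1
--     buckets = {}
--     for k, d in deg.items():
--         buckets.setdefault(d, []).append(k)
--     answer = 0
--     rank = N
--     for d in range(2 * len(A), 0, -1):
--         for _k in buckets.get(d, []):
--             answer += rank * d
--             rank -= 1
--     return answer
-- ===== Notes on version B (the rewrite author's own statement) =====
-- stated objective: faster
-- what changed: B replaces A's O(V log V) comparison sort of the degree table (plus a rank dict and a second edge sweep) with a counting/bucket pass: degrees are grouped into buckets and walked from the top degree down, accumulating rank*degree directly, so no sort and no per-edge rank lookups happen.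
-- outside the precondition, e.g. on solution(3, [1], []): A raises IndexError, B returns 0
import Mathlib
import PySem

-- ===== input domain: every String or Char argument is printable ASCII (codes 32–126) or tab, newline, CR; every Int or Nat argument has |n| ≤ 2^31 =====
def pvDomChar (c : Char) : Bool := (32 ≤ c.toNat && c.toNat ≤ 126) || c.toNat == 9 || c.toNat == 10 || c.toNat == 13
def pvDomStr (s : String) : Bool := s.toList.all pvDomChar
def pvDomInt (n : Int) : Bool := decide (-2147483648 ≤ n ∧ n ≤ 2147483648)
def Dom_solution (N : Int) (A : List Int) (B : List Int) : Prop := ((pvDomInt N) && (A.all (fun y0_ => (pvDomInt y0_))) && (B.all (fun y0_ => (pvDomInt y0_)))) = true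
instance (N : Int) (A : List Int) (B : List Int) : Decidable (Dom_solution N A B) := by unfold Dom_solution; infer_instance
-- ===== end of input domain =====

-- B replaces A's comparison sort of the nodes by degree with a counting/bucket pass over degrees
-- (grouping nodes by degree, then walking degrees downward); return-value equivalence is proved on Pre_.

-- ===== PORT A =====
-- 'if k not in node: node[k] = 1 else: node[k] += 1' (done for A[i] and then B[i])
def pyIncr (node : PySem.Dict Int Int) (k : Int) : PySem.Dict Int Int :=
  if node.contains k = false then node.insert k 1 else node.modify k 0 (· + 1)

def solution (N : Int) (A : List Int) (B : List Int) : Int :=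
  -- node = {}; for i in range(len(A)): count A[i], then B[i]
  let node : PySem.Dict Int Int :=
    (PySem.List.pyRange 0 (A.length : Int) 1).foldl
      (fun node i => pyIncr (pyIncr node (PySem.List.pyGetD A i 0)) (PySem.List.pyGetD B i 0))
      PySem.Dict.empty
  -- node = dict(sorted(node.items(), key=lambda x: x[1], reverse=True))
  let node2 := PySem.Dict.ofList (PySem.List.sorted node.items (fun x => x.2) true)
  -- tmp = N; for k, v in node.items(): node[k] = tmp; tmp -= 1
  let st := node2.items.foldl (fun (p : PySem.Dict Int Int × Int) kv =>
      (p.1.insert kv.1 p.2, p.2 - 1)) (node2, N)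
  -- for i in range(len(A)): answer += node[A[i]] + node[B[i]]   (keys are present on Pre_)
  (PySem.List.pyRange 0 (A.length : Int) 1).foldl (fun answer i =>
      answer + st.1.getD (PySem.List.pyGetD A i 0) 0 + st.1.getD (PySem.List.pyGetD B i 0) 0) 0

-- ===== PORT B =====
-- 'deg[k] = deg.get(k, 0) + 1'
def bumpDeg (d : PySem.Dict Int Int) (k : Int) : PySem.Dict Int Int :=
  d.insert k (d.getD k 0 + 1)

def solution_alt (N : Int) (A : List Int) (B : List Int) : Int :=
  -- deg = {}; for a, b in zip(A, B): bump a, then b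
  let deg : PySem.Dict Int Int :=
    (A.zip B).foldl (fun d p => bumpDeg (bumpDeg d p.1) p.2) PySem.Dict.empty
  -- buckets = {}; for k, d in deg.items(): buckets.setdefault(d, []).append(k)
  let buckets : PySem.Dict Int (List Int) :=
    deg.items.foldl (fun bs kv => bs.modify kv.2 [] (· ++ [kv.1])) PySem.Dict.empty
  -- answer = 0; rank = N; for d in range(2*len(A), 0, -1): for _k in buckets.get(d, []): answer += rank*d; rank -= 1
  let st := (PySem.List.pyRange (2 * (A.length : Int)) 0 (-1)).foldl
      (fun (p : Int × Int) d =>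
        (buckets.getD d []).foldl (fun (q : Int × Int) _k => (q.1 + q.2 * d, q.2 - 1)) p)
      (0, N)
  st.1

-- ===== PRECONDITION & SPEC =====
-- A indexes B by range(len(A)), so it raises IndexError when len(B) < len(A); Pre_ excludes exactly that.
def Pre_solution (N : Int) (A : List Int) (B : List Int) : Prop := A.length ≤ B.length
instance (N : Int) (A : List Int) (B : List Int) : Decidable (Pre_solution N A B) := by unfold Pre_solution; infer_instance
def pvWitness_solution : Int × List Int × List Int := (5, [1, 2, 1], [2, 3, 3])

def Spec_solution (N : Int) (A : List Int) (B : List Int) (out : Int) : Prop := out = solution_alt N A B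
instance (N : Int) (A : List Int) (B : List Int) (out : Int) : Decidable (Spec_solution N A B out) := by unfold Spec_solution; infer_instance

-- ===== CLAIM (what is proved, stated in full; the proofs are below) =====
def Claim_equal_solution : Prop := ∀ (N : Int) (A : List Int) (B : List Int), Dom_solution N A B → Pre_solution N A B → Spec_solution N A B (solution N A B)

-- ===== LEMMAS AND PROOFS =====

-- the multiset of edge endpoints, and the degree table (Counter) both programs build over it
def pairsL (A B : List Int) : List Int := (A.zip B).flatMap (fun p => [p.1, p.2])
def itemsC (A B : List Int) : List (Int × Int) := (PySem.Dict.counter (pairsL A B)).items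

-- r * s[0].2 + (r-1) * s[1].2 + … : the rank-weighted degree sum both programs compute
def rankSum : List (Int × Int) → Int → Int
  | [], _ => 0
  | kv :: t, r => r * kv.2 + rankSum t (r - 1)

-- an index loop reading A[i] and B[i] is a loop over zip(A, B)
theorem foldl_range_zip2 {σ : Type} (f : σ → Int → Int → σ) :
    ∀ (A B : List Int), A.length ≤ B.length → ∀ (init : σ),
      (List.range A.length).foldl (fun s k => f s (A.getD k 0) (B.getD k 0)) init
        = (A.zip B).foldl (fun s p => f s p.1 p.2) init := by
  intro A
  induction A with
  | nil => intro B h init; simp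
  | cons a A' ih =>
    intro B h init
    cases B with
    | nil => simp at h
    | cons b B' =>
      simp only [List.length_cons, List.range_succ_eq_map, List.foldl_cons, List.foldl_map,
        List.getD_cons_succ, List.getD_cons_zero, List.zip_cons_cons]
      exact ih B' (by simpa using h) (f init a b)

theorem foldl_pyRange_zip2 {σ : Type} (f : σ → Int → Int → σ)
    (A B : List Int) (h : A.length ≤ B.length) (init : σ) :
    (PySem.List.pyRange 0 (A.length : Int) 1).foldl
        (fun s i => f s (PySem.List.pyGetD A i 0) (PySem.List.pyGetD B i 0)) init
      = (A.zip B).foldl (fun s p => f s p.1 p.2) init := by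
  rw [PySem.List.pyRange_one, List.foldl_map]
  have key : ∀ (s : σ) (k : Nat), f s (PySem.List.pyGetD A ((0 : Int) + k) 0) (PySem.List.pyGetD B ((0 : Int) + k) 0)
      = f s (A.getD k 0) (B.getD k 0) := by
    intro s k
    rw [show ((0 : Int) + k) = (k : Int) by omega, PySem.List.pyGetD_natCast, PySem.List.pyGetD_natCast]
  calc (List.range ((A.length : Int) - 0).toNat).foldl
        (fun (s : σ) (k : Nat) => f s (PySem.List.pyGetD A ((0 : Int) + k) 0) (PySem.List.pyGetD B ((0 : Int) + k) 0)) init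
      = (List.range A.length).foldl (fun s k => f s (A.getD k 0) (B.getD k 0)) init := by
        rw [show ((A.length : Int) - 0).toNat = A.length by omega]
        exact PySem.List.foldl_congr_mem _ _ _ _ (by intro s k _; exact key s k)
    _ = (A.zip B).foldl (fun s p => f s p.1 p.2) init := foldl_range_zip2 f A B h init

-- a loop doing two steps per pair is a loop over the flattened pair list
theorem foldl_pairs {σ : Type} (f : σ → Int → σ) :
    ∀ (ps : List (Int × Int)) (init : σ),
      ps.foldl (fun s p => f (f s p.1) p.2) init
        = (ps.flatMap (fun p => [p.1, p.2])).foldl f init := by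
  intro ps
  induction ps with
  | nil => intro init; simp
  | cons p t ih => intro init; simp only [List.foldl_cons, List.flatMap_cons, List.foldl_append]; exact ih _

theorem pyIncr_eq_modify (d : PySem.Dict Int Int) (k : Int) :
    pyIncr d k = d.modify k 0 (· + 1) := by
  unfold pyIncr
  by_cases h : d.contains k = false
  · rw [if_pos h]
    show d.insert k 1 = d.insert k ((d.getD k 0) + 1)
    rw [PySem.Dict.getD_of_not_contains d 0 h]
    norm_num
  · rw [if_neg h]

-- A's first loop builds Counter(pairsL)
theorem nodeA_eq_counter (ps : List (Int × Int)) :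
    ps.foldl (fun node p => pyIncr (pyIncr node p.1) p.2) PySem.Dict.empty
      = PySem.Dict.counter (ps.flatMap (fun p => [p.1, p.2])) := by
  rw [PySem.Dict.counter_eq_foldl, ← foldl_pairs (σ := PySem.Dict Int Int) (fun d x => d.modify x 0 (· + 1)) ps]
  exact PySem.List.foldl_congr_mem _ _ _ _ (by intro d p _; simp only [pyIncr_eq_modify])

-- B's first loop builds the same Counter
theorem degB_eq_counter (ps : List (Int × Int)) :
    ps.foldl (fun d p => bumpDeg (bumpDeg d p.1) p.2) PySem.Dict.empty
      = PySem.Dict.counter (ps.flatMap (fun p => [p.1, p.2])) := by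
  rw [← PySem.Dict.foldl_insert_getD_add_one_eq_counter,
    ← foldl_pairs (σ := PySem.Dict Int Int) (fun d x => d.insert x (d.getD x 0 + 1)) ps]
  exact PySem.List.foldl_congr_mem _ _ _ _ (by intro d p _; rfl)

-- dict(pairs) with nodup keys has exactly those items
theorem items_ofList_nodup (S : List (Int × Int)) (h : (S.map Prod.fst).Nodup) :
    (PySem.Dict.ofList S).items = S := by
  show (S.foldl (fun d p => d.insert p.1 p.2) PySem.Dict.empty).items = S
  rw [PySem.Dict.items_foldl_insert_fresh S Prod.fst Prod.snd PySem.Dict.empty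
    (fun a _ => PySem.Dict.contains_empty a.1) h]
  show PySem.Dict.empty.items ++ S.map (fun a => (a.1, a.2)) = S
  simp [PySem.Dict.empty]

-- rank-assignment fold does not touch keys outside the list
theorem rankDict_getD_notmem (k : Int) :
    ∀ (S : List (Int × Int)), k ∉ S.map Prod.fst → ∀ (d : PySem.Dict Int Int) (r : Int),
      ((S.foldl (fun (p : PySem.Dict Int Int × Int) kv => (p.1.insert kv.1 p.2, p.2 - 1)) (d, r)).1).getD k 0
        = d.getD k 0 := by
  intro S
  induction S with
  | nil => intro _ d r; rfl
  | cons kv t ih =>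
    intro hk d r
    simp only [List.map_cons, List.mem_cons, not_or] at hk
    simp only [List.foldl_cons]
    rw [ih hk.2, PySem.Dict.getD_insert_of_ne _ _ _ hk.1]

-- the degree-weighted sum of A's assigned ranks is rankSum
theorem rank_sum_eq :
    ∀ (S : List (Int × Int)), (S.map Prod.fst).Nodup → ∀ (d : PySem.Dict Int Int) (r : Int),
      (S.map (fun kv => kv.2 *
          ((S.foldl (fun (p : PySem.Dict Int Int × Int) kv => (p.1.insert kv.1 p.2, p.2 - 1)) (d, r)).1).getD kv.1 0)).sum
        = rankSum S r := by
  intro S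
  induction S with
  | nil => intro _ d r; simp [rankSum]
  | cons kv t ih =>
    intro hnd d r
    simp only [List.map_cons, List.nodup_cons] at hnd
    simp only [List.foldl_cons, List.map_cons, List.sum_cons, rankSum]
    congr 1
    · rw [rankDict_getD_notmem kv.1 t hnd.1, PySem.Dict.getD_insert_self]
      ring
    · exact ih hnd.2 (d.insert kv.1 r) (r - 1)

-- grouping a sum over a list by its distinct values with multiplicities
theorem sum_group (g : Int → Int) :
    ∀ (L : List Int),
      (L.map g).sum = ((PySem.Set.ofList L).map (fun k => (L.count k : Int) * g k)).sum := by
  intro L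
  induction L using List.reverseRecOn with
  | nil => simp [PySem.Set.ofList]
  | append_singleton L x ih =>
    rw [List.map_append, List.sum_append, ih, PySem.Set.ofList_append_singleton,
      PySem.Set.add_eq_ite]
    by_cases hx : x ∈ PySem.Set.ofList L
    · rw [if_pos hx]
      obtain ⟨s1, s2, hs⟩ := List.append_of_mem hx
      have hnd := PySem.Set.nodup_ofList L
      rw [hs] at hnd
      have hx1 : x ∉ s1 := by
        intro hc; exact (List.disjoint_of_nodup_append hnd) hc (by simp)
      have hx2 : x ∉ s2 := by
        have := (List.nodup_append.1 hnd).2.1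
        simp [List.nodup_cons] at this
        exact this.1
      rw [hs]
      simp only [List.map_append, List.map_cons, List.sum_append, List.sum_cons]
      have c1 : ∀ (s : List Int), x ∉ s →
          (s.map (fun k => ((L ++ [x]).count k : Int) * g k)).sum
            = (s.map (fun k => (L.count k : Int) * g k)).sum := by
        intro s hxs
        congr 1
        apply List.map_congr_left
        intro k hk
        have h' : x ≠ k := by rintro rfl; exact hxs hk
        rw [List.count_append]
        simp [h']
      rw [c1 s1 hx1, c1 s2 hx2, List.count_append]
      simp only [List.count_cons, List.count_nil, BEq.rfl, if_true]
      push_cast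
      simp
      ring
    · rw [if_neg hx]
      simp only [List.map_append, List.map_singleton, List.sum_append, List.sum_singleton]
      have hxL : x ∉ L := fun hc => hx ((PySem.Set.mem_ofList L x).2 hc)
      have c1 : ((PySem.Set.ofList L).map (fun k => ((L ++ [x]).count k : Int) * g k)).sum
          = ((PySem.Set.ofList L).map (fun k => (L.count k : Int) * g k)).sum := by
        congr 1
        apply List.map_congr_left
        intro k hk
        have h' : x ≠ k := by rintro rfl; exact hx hk
        rw [List.count_append]
        simp [h']
      rw [c1, List.count_append]
      have hz : L.count x = 0 := List.count_eq_zero.2 hxL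
      simp only [List.count_cons, List.count_nil, BEq.rfl, if_true, hz]
      push_cast
      ring

-- stable insertion skips a prefix it compares as not-before
theorem insertBy_append_left {α : Type} (before : α → α → Bool) (x : α) :
    ∀ (as bs : List α), (∀ a ∈ as, before x a = false) →
      PySem.List.insertBy before x (as ++ bs) = as ++ PySem.List.insertBy before x bs := by
  intro as
  induction as with
  | nil => intro bs _; rfl
  | cons a t ih =>
    intro bs h
    have ha : before x a = false := h a (by simp)
    simp only [List.cons_append, PySem.List.insertBy, ha, Bool.false_eq_true, if_false]
    rw [ih bs (fun a ha => h a (by simp [ha]))]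

theorem insertBy_front {α : Type} (before : α → α → Bool) (x : α)
    (bs : List α) (h : ∀ y ∈ bs, before x y = true) :
    PySem.List.insertBy before x bs = x :: bs := by
  cases bs with
  | nil => rfl
  | cons y ys => simp only [PySem.List.insertBy, h y (by simp), if_true]

theorem sorted_rev_append_singleton (xs : List (Int × Int)) (x : Int × Int) :
    PySem.List.sorted (xs ++ [x]) (fun y => y.2) true
      = PySem.List.insertBy (fun a b => decide (b.2 < a.2)) x (PySem.List.sorted xs (fun y => y.2) true) := by
  rw [PySem.List.sorted_rev_eq_foldl_insertBy, PySem.List.sorted_rev_eq_foldl_insertBy, List.foldl_append]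
  rfl

-- stable descending sort: maximal-key elements first (in input order), then the rest sorted
theorem sorted_rev_max_split (S : List (Int × Int)) (m : Int)
    (hub : ∀ kv ∈ S, kv.2 ≤ m) :
    PySem.List.sorted S (fun x => x.2) true
      = S.filter (fun kv => kv.2 == m)
        ++ PySem.List.sorted (S.filter (fun kv => !(kv.2 == m))) (fun x => x.2) true := by
  induction S using List.reverseRecOn with
  | nil => simp
  | append_singleton S x ih =>
    have hubS : ∀ kv ∈ S, kv.2 ≤ m := fun kv hkv => hub kv (by simp [hkv])
    have hx : x.2 ≤ m := hub x (by simp)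
    rw [sorted_rev_append_singleton, ih hubS]
    by_cases hm : x.2 = m
    · have hP : ∀ a ∈ S.filter (fun kv => kv.2 == m), (fun a b => decide (b.2 < a.2)) x a = false := by
        intro a ha
        have := List.of_mem_filter ha
        simp only [beq_iff_eq] at this
        simp [this, hm]
      rw [insertBy_append_left _ _ _ _ hP,
        insertBy_front _ _ _ (by
          intro y hy
          have hy' := ((PySem.List.mem_sorted _ _ _) y).1 hy
          have h1 := List.of_mem_filter hy'
          have h2 := hubS y (List.mem_of_mem_filter hy')
          simp only [Bool.not_eq_eq_eq_not, Bool.not_true, beq_eq_false_iff_ne, ne_eq] at h1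
          simp only [decide_eq_true_eq]
          omega)]
      rw [List.filter_append, List.filter_append]
      simp [hm]
    · have hP : ∀ a ∈ S.filter (fun kv => kv.2 == m), (fun a b => decide (b.2 < a.2)) x a = false := by
        intro a ha
        have := List.of_mem_filter ha
        simp only [beq_iff_eq] at this
        simp only [decide_eq_false_iff_not, not_lt, this]
        omega
      rw [insertBy_append_left _ _ _ _ hP]
      rw [List.filter_append, List.filter_append]
      simp only [List.filter_cons, List.filter_nil]
      rw [if_neg (by simp [hm]), if_pos (by simp [hm])]
      rw [sorted_rev_append_singleton]
      simp

-- stable descending sort = buckets by key, walked from the top key down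
theorem sorted_rev_eq_flatMap :
    ∀ (m : Nat) (S : List (Int × Int)), (∀ kv ∈ S, 1 ≤ kv.2 ∧ kv.2 ≤ (m : Int)) →
      PySem.List.sorted S (fun x => x.2) true
        = (PySem.List.pyRange (m : Int) 0 (-1)).flatMap (fun d => S.filter (fun kv => kv.2 == d)) := by
  intro m
  induction m with
  | zero =>
    intro S h
    have hS : S = [] := by
      cases S with
      | nil => rfl
      | cons kv t => have := h kv (by simp); push_cast at this; omega
    subst hS
    rw [PySem.List.pyRange_neg_one_eq_nil (by norm_num)]
    simp only [List.flatMap_nil]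
    exact (PySem.List.sorted_eq_nil_iff _ _ _).2 rfl
  | succ m ih =>
    intro S h
    rw [sorted_rev_max_split S ((m : Int) + 1)
      (by intro kv hkv; have := (h kv hkv).2; push_cast at this; omega)]
    rw [ih (S.filter (fun kv => !(kv.2 == ((m : Int) + 1))))
      (by
        intro kv hkv
        have h1 := h kv (List.mem_of_mem_filter hkv)
        have h2 := List.of_mem_filter hkv
        simp only [Bool.not_eq_eq_eq_not, Bool.not_true, beq_eq_false_iff_ne, ne_eq] at h2
        push_cast at h1 ⊢
        omega)]
    have hc : PySem.List.pyRange ((m + 1 : Nat) : Int) 0 (-1)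
        = ((m : Int) + 1) :: PySem.List.pyRange (m : Int) 0 (-1) := by
      rw [show ((m + 1 : Nat) : Int) = (m : Int) + 1 by push_cast; ring]
      rw [PySem.List.pyRange_neg_one_cons (by omega)]
      norm_num
    rw [hc, List.flatMap_cons]
    congr 1
    rw [List.flatMap_def, List.flatMap_def]
    congr 1
    apply List.map_congr_left
    intro d hd
    have hd' := PySem.List.mem_pyRange_neg_one.1 hd
    rw [List.filter_filter]
    apply List.filter_congr
    intro kv _
    by_cases hkv : kv.2 = d
    · have hne : d ≠ (m : Int) + 1 := by omega
      simp [hkv, hne]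
    · simp [hkv]

-- B's double loop over buckets is one loop over the concatenated buckets
theorem bucket_fold_eq (bkt : Int → List (Int × Int)) :
    ∀ (ds : List Int), (∀ d ∈ ds, ∀ kv ∈ bkt d, kv.2 = d) → ∀ (a r : Int),
      ds.foldl (fun (p : Int × Int) d =>
          ((bkt d).map Prod.fst).foldl (fun (q : Int × Int) _k => (q.1 + q.2 * d, q.2 - 1)) p) (a, r)
        = ((ds.flatMap bkt).foldl (fun (q : Int × Int) kv => (q.1 + q.2 * kv.2, q.2 - 1)) (a, r)) := by
  intro ds
  induction ds with
  | nil => intro _ a r; rfl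
  | cons d t ih =>
    intro h a r
    simp only [List.foldl_cons, List.flatMap_cons, List.foldl_append]
    have hinner : ((bkt d).map Prod.fst).foldl (fun (q : Int × Int) _k => (q.1 + q.2 * d, q.2 - 1)) (a, r)
        = (bkt d).foldl (fun (q : Int × Int) kv => (q.1 + q.2 * kv.2, q.2 - 1)) (a, r) := by
      rw [List.foldl_map]
      exact PySem.List.foldl_congr_mem _ _ _ _ (by
        intro q kv hkv
        rw [h d (by simp) kv hkv])
    rw [hinner]
    generalize (bkt d).foldl (fun (q : Int × Int) kv => (q.1 + q.2 * kv.2, q.2 - 1)) (a, r) = p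
    obtain ⟨a', r'⟩ := p
    exact ih (fun d' hd' => h d' (by simp [hd'])) a' r'

theorem rankSum_fold (S : List (Int × Int)) :
    ∀ (a r : Int),
      S.foldl (fun (q : Int × Int) kv => (q.1 + q.2 * kv.2, q.2 - 1)) (a, r)
        = (a + rankSum S r, r - S.length) := by
  induction S with
  | nil => intro a r; simp [rankSum]
  | cons kv t ih =>
    intro a r
    simp only [List.foldl_cons, ih, rankSum, List.length_cons]
    rw [Prod.ext_iff]
    constructor
    · simp only; ring
    · simp only; push_cast; ring

-- the two sides
theorem solA_eq (N : Int) (A B : List Int) (hpre : A.length ≤ B.length) :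
    solution N A B = rankSum (PySem.List.sorted (itemsC A B) (fun x => x.2) true) N := by
  simp only [solution]
  rw [foldl_pyRange_zip2 (σ := PySem.Dict Int Int) (fun node x y => pyIncr (pyIncr node x) y) A B hpre]
  rw [nodeA_eq_counter]
  rw [show (A.zip B).flatMap (fun p => [p.1, p.2]) = pairsL A B from rfl]
  rw [show (PySem.Dict.counter (pairsL A B)).items = itemsC A B from rfl]
  have h0 : ((itemsC A B).map Prod.fst).Nodup := PySem.Dict.nodup_keys_counter (pairsL A B)
  have hndS : ((PySem.List.sorted (itemsC A B) (fun x => x.2) true).map Prod.fst).Nodup :=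
    ((PySem.List.sorted_perm (itemsC A B) (fun x => x.2) true).map Prod.fst).nodup_iff.2 h0
  rw [items_ofList_nodup _ hndS]
  set S := PySem.List.sorted (itemsC A B) (fun x => x.2) true with hS
  set R := (S.foldl (fun (p : PySem.Dict Int Int × Int) kv => (p.1.insert kv.1 p.2, p.2 - 1))
      (PySem.Dict.ofList S, N)).1 with hR
  rw [foldl_pyRange_zip2 (σ := Int) (fun ans x y => ans + R.getD x 0 + R.getD y 0) A B hpre]
  rw [foldl_pairs (σ := Int) (fun s x => s + R.getD x 0)]
  rw [show (A.zip B).flatMap (fun p => [p.1, p.2]) = pairsL A B from rfl]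
  rw [PySem.List.foldl_add]
  rw [sum_group (fun x => R.getD x 0) (pairsL A B)]
  have hgrp : ((PySem.Set.ofList (pairsL A B)).map (fun k => ((pairsL A B).count k : Int) * R.getD k 0)).sum
      = ((itemsC A B).map (fun kv => kv.2 * R.getD kv.1 0)).sum := by
    unfold itemsC
    rw [PySem.Dict.items_counter, List.map_map]
    simp [Function.comp_def]
  have hperm : ((itemsC A B).map (fun kv => kv.2 * R.getD kv.1 0)).sum
      = (S.map (fun kv => kv.2 * R.getD kv.1 0)).sum :=
    (List.Perm.sum_eq ((PySem.List.sorted_perm (itemsC A B) (fun x => x.2) true).map _)).symm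
  rw [hgrp, hperm, hR]
  rw [rank_sum_eq S hndS (PySem.Dict.ofList S) N]
  omega

theorem lenL (ps : List (Int × Int)) :
    (ps.flatMap (fun p => [p.1, p.2])).length = 2 * ps.length := by
  induction ps with
  | nil => simp
  | cons p t ih => simp only [List.flatMap_cons, List.length_append, List.length_cons, ih, List.length_nil]; omega

theorem hub_itemsC (A B : List Int) (hpre : A.length ≤ B.length) :
    ∀ kv ∈ itemsC A B, 1 ≤ kv.2 ∧ kv.2 ≤ ((2 * A.length : Nat) : Int) := by
  intro kv hkv
  unfold itemsC at hkv
  rw [PySem.Dict.items_counter] at hkv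
  obtain ⟨k, hk, rfl⟩ := List.mem_map.1 hkv
  have hkL : k ∈ pairsL A B := (PySem.Set.mem_ofList _ _).1 hk
  have h1 : 0 < (pairsL A B).count k := List.count_pos_iff.2 hkL
  have h2 : (pairsL A B).count k ≤ (pairsL A B).length := List.count_le_length
  have h3 : (pairsL A B).length = 2 * A.length := by
    unfold pairsL
    rw [lenL, List.length_zip]
    omega
  constructor <;> simp only [] <;> push_cast <;> omega

theorem solB_eq (N : Int) (A B : List Int) (hpre : A.length ≤ B.length) :
    solution_alt N A B = rankSum (PySem.List.sorted (itemsC A B) (fun x => x.2) true) N := by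
  simp only [solution_alt]
  rw [degB_eq_counter]
  rw [show (A.zip B).flatMap (fun p => [p.1, p.2]) = pairsL A B from rfl]
  rw [show (PySem.Dict.counter (pairsL A B)).items = itemsC A B from rfl]
  have hbkt : ∀ d : Int,
      ((itemsC A B).foldl (fun bs kv => bs.modify kv.2 [] (· ++ [kv.1])) PySem.Dict.empty).getD d []
        = ((itemsC A B).filter (fun kv => kv.2 == d)).map Prod.fst := by
    intro d
    rw [show ((itemsC A B).foldl (fun bs kv => bs.modify kv.2 [] (· ++ [kv.1])) PySem.Dict.empty)
        = (((itemsC A B).map (fun kv => (kv.2, kv.1))).foldl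
            (fun bs p => bs.modify p.1 [] (· ++ [p.2])) PySem.Dict.empty)
      from by rw [List.foldl_map]]
    rw [PySem.Dict.getD_foldl_modify_append]
    rw [List.filter_map, List.map_map]
    simp only [Function.comp_def]
    rfl
  simp only [hbkt]
  rw [show (2 * (A.length : Int)) = ((2 * A.length : Nat) : Int) by push_cast; ring]
  rw [bucket_fold_eq (fun d => (itemsC A B).filter (fun kv => kv.2 == d)) _
    (by
      intro d _ kv hkv
      have := List.of_mem_filter hkv
      simpa using this) 0 N]
  rw [← sorted_rev_eq_flatMap (2 * A.length) (itemsC A B) (hub_itemsC A B hpre)]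
  rw [rankSum_fold]
  simp

-- ===== VERDICT (by name: the statement is the Claim_ definition above) =====
theorem solution_spec : Claim_equal_solution := by
  intro N A B _ hpre
  unfold Spec_solution
  rw [solA_eq N A B hpre, solB_eq N A B hpre]
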